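-- pv_equiv track=rewrite | github.com/globalize9/mfe2020 | tempTestScript.py | greatereq
-- ===== SOURCE A (Python) =====
-- def greatereq (arr, x):
--     counter = 0
--     for i in arr:
--         if i >= x:
--             counter += 1
--
--     if (counter == len(arr)):
--         return (1)
--     else:
--         return (0)
-- ===== SOURCE B (Python) =====
-- def greatereq(arr, x):
--     return 1 if not arr or min(arr) >= x else 0
-- ===== Notes on version B (the rewrite author's own statement) =====
-- stated objective: idiomatic
-- what changed: B replaces A's count-satisfying-elements-then-compare-to-length loop with a single min aggregate: empty list or min(arr) >= x yields 1, else 0.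
import Mathlib
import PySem

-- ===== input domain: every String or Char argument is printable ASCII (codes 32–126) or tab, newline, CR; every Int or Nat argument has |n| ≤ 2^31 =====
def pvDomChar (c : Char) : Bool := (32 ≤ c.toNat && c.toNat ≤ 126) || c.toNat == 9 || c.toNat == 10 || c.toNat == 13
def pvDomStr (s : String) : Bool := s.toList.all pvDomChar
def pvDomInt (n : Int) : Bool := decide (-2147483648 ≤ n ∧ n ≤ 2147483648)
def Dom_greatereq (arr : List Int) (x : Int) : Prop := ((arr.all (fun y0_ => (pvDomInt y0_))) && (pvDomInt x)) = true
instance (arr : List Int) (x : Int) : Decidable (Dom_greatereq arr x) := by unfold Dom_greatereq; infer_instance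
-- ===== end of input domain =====

-- B computes the same 1/0 answer via a min aggregate instead of A's match-count loop (idiomatic; same O(n) cost).

-- ===== PORT A =====
def greatereq (arr : List Int) (x : Int) : Int :=
  let counter := arr.foldl (fun c i => if i ≥ x then c + 1 else c) 0
  if counter = (arr.length : Int) then 1 else 0

-- ===== PORT B =====
def greatereq_alt (arr : List Int) (x : Int) : Int :=
  if arr = [] then 1
  else match PySem.List.min? arr (fun y => y) with
    | some m => if m ≥ x then 1 else 0
    | none => 1  -- unreachable: arr ≠ []

-- ===== PRECONDITION & SPEC =====
def Spec_greatereq (arr : List Int) (x : Int) (out : Int) : Prop := out = greatereq_alt arr x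
instance (arr : List Int) (x : Int) (out : Int) : Decidable (Spec_greatereq arr x out) := by unfold Spec_greatereq; infer_instance

-- ===== CLAIM (what is proved, stated in full; the proofs are below) =====
def Claim_equal_greatereq : Prop := ∀ (arr : List Int) (x : Int), Dom_greatereq arr x → Spec_greatereq arr x (greatereq arr x)

-- ===== LEMMAS AND PROOFS =====

-- A's counter, started at c, equals c + (number of elements ≥ x).
theorem pv_counter_eq (arr : List Int) (x : Int) (c : Int) :
    arr.foldl (fun c i => if i ≥ x then c + 1 else c) c
      = c + ((arr.filter (fun i => decide (i ≥ x))).length : Int) := by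
  induction arr generalizing c with
  | nil => simp
  | cons h t ih =>
    simp only [List.foldl_cons, List.filter_cons]
    by_cases hx : h ≥ x <;> simp [hx, ih] <;> push_cast <;> ring

-- counter = length ↔ every element satisfies the predicate.
theorem pv_count_all (arr : List Int) (x : Int) :
    ((arr.filter (fun i => decide (i ≥ x))).length = arr.length) ↔ (∀ i ∈ arr, i ≥ x) := by
  rw [List.length_filter_eq_length_iff]
  simp

theorem pv_min_isMin (arr : List Int) (m : Int)
    (hm : PySem.List.min? arr (fun y => y) = some m) : ∀ y ∈ arr, m ≤ y :=
  fun y hy => PySem.List.min?_isMin hm y hy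

-- ===== VERDICT (by name: the statement is the Claim_ definition above) =====
theorem greatereq_spec : Claim_equal_greatereq := by
  intro arr x _
  unfold Spec_greatereq greatereq greatereq_alt
  cases harr : arr with
  | nil => simp
  | cons h t =>
    simp only [reduceCtorEq, if_false]
    have hmin : PySem.List.min? (h :: t) (fun y => y) = some (t.foldl min h) :=
      PySem.List.min?_id_cons h t
    rw [hmin]
    rw [pv_counter_eq]
    have hcount := pv_count_all (h :: t) x
    by_cases hall : ∀ i ∈ (h :: t), i ≥ x
    · have hlen : ((h :: t).filter (fun i => decide (i ≥ x))).length = (h :: t).length :=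
        hcount.mpr hall
      have hm : t.foldl min h ≥ x := by
        have hmem := PySem.List.min?_mem hmin
        exact hall _ (by simpa using hmem)
      simp [hlen, hm]
    · have hlen : ((h :: t).filter (fun i => decide (i ≥ x))).length ≠ (h :: t).length := by
        intro he; exact hall (hcount.mp he)
      have hm : ¬ (t.foldl min h ≥ x) := by
        intro hge
        exact hall (fun i hi => le_trans hge (pv_min_isMin _ _ hmin i hi))
      have hlen' : ¬ (((h :: t).filter (fun i => decide (x ≤ i))).length : Int) = ((t.length : Int) + 1) := by
        intro he
        apply hlen
        have : ((h :: t).filter (fun i => decide (i ≥ x))).length = t.length + 1 := by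
          simpa [ge_iff_le] using (by exact_mod_cast he : ((h :: t).filter (fun i => decide (x ≤ i))).length = t.length + 1)
        simpa using this
      simp [ge_iff_le, hlen', hm]
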